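-- pv_equiv track=rewrite | github.com/Patxi91/CodeWars_Cloud | 6kyu-Color Choice-Patxi.py | checkchoose
-- ===== SOURCE A (Python) =====
-- import math
--
-- def checkchoose(m, n):
--
--     if m == 1:
--         return 0
--
--     for x in range(1, n + 1):
--         combinations = math.comb(n, x)
--         if combinations == m:
--             return x
--     return -1
-- ===== SOURCE B (Python) =====
-- def checkchoose(m, n):
--     if m == 1:
--         return 0
--     # C(n,x) is strictly increasing for x in [1, n//2]; values for x > n//2
--     # mirror values at n-x < x (and C(n,n)=1=m is excluded above), so the
--     # smallest match, if any, lies in [1, n//2].  Maintain c = C(n,x)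
--     # incrementally and stop as soon as c >= m.
--     c = 1
--     x = 0
--     while x < n // 2:
--         x += 1
--         c = c * (n - x + 1) // x
--         if c >= m:
--             return x if c == m else -1
--     return -1
-- ===== Notes on version B (the rewrite author's own statement) =====
-- stated objective: faster
-- what changed: Instead of recomputing math.comb(n,x) from scratch for every x up to n, B maintains C(n,x) by the incremental update C(n,x)=C(n,x-1)*(n-x+1)//x, scans only x<=n//2 (symmetry C(n,x)=C(n,n-x) makes the rest redundant once m=1 is handled), and exits as soon as the strictly increasing value reaches m.
import Mathlib
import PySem

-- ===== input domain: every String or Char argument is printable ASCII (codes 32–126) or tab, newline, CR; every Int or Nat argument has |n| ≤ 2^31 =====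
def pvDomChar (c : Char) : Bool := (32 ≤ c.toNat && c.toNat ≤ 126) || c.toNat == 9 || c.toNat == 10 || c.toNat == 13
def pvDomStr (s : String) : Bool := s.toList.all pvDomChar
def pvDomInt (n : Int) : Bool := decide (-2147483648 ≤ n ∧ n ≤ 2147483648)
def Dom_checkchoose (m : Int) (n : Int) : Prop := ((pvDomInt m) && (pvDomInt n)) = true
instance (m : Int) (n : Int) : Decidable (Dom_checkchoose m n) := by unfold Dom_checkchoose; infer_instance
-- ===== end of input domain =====

-- B replaces A's per-x recomputation of math.comb(n,x) by the incremental update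
-- C(n,x) = C(n,x-1)*(n-x+1)//x, scans only x ≤ n//2 (symmetry covers the rest once
-- m = 1 is handled) and exits as soon as the strictly increasing value reaches m
-- (objective: faster).

-- ===== PORT A =====
-- math.comb(n, x); exact on the arguments A uses (1 ≤ x ≤ n).
def pyComb (n x : Int) : Int := ((n.toNat).choose x.toNat : Int)

-- the `for x in range(1, n+1)` loop with its early returns
def loopA (m n : Int) : List Int → Int
  | [] => -1
  | x :: xs => if pyComb n x = m then x else loopA m n xs

def checkchoose (m : Int) (n : Int) : Int :=
  if m = 1 then 0
  else loopA m n (PySem.List.pyRange 1 (n + 1) 1)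

-- ===== PORT B =====
-- the `while x < n // 2` loop; fuel = number of remaining iterations (n//2 - x)
def loopB (m n : Int) (c x : Int) : Nat → Int
  | 0 => -1
  | fuel + 1 =>
    let x' := x + 1
    let c' := PySem.Int.floordiv (c * (n - x' + 1)) x'
    if m ≤ c' then (if c' = m then x' else -1)
    else loopB m n c' x' fuel

def checkchoose_alt (m : Int) (n : Int) : Int :=
  if m = 1 then 0
  else loopB m n 1 0 (PySem.Int.floordiv n 2).toNat

-- ===== PRECONDITION & SPEC =====
def Spec_checkchoose (m : Int) (n : Int) (out : Int) : Prop := out = checkchoose_alt m n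
instance (m : Int) (n : Int) (out : Int) : Decidable (Spec_checkchoose m n out) := by unfold Spec_checkchoose; infer_instance

-- ===== CLAIM (what is proved, stated in full; the proofs are below) =====
def Claim_equal_checkchoose : Prop := ∀ (m : Int) (n : Int), Dom_checkchoose m n → Spec_checkchoose m n (checkchoose m n)

-- ===== LEMMAS AND PROOFS =====

-- incremental identity: C(N,k)*(N-k) / (k+1) = C(N,k+1) (exact division)
theorem pv_choose_step (N k : ℕ) : (N.choose k * (N - k)) / (k + 1) = N.choose (k + 1) := by
  rw [← Nat.choose_succ_right_eq]
  exact Nat.mul_div_cancel _ (Nat.succ_pos k)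

-- strict increase up to the middle
theorem pv_choose_lt (N k : ℕ) (h : k + 1 ≤ N / 2) : N.choose k < N.choose (k + 1) := by
  have hk : k ≤ N := by omega
  have hpos : 0 < N.choose k := Nat.choose_pos hk
  have hNk : k + 2 ≤ N - k := by omega
  have h1 : N.choose k * (k + 1) < N.choose k * (N - k) :=
    mul_lt_mul_of_pos_left (by omega) hpos
  rw [← Nat.choose_succ_right_eq] at h1
  exact Nat.lt_of_mul_lt_mul_right h1

theorem pv_choose_mono (N : ℕ) : ∀ (y x : ℕ), x < y → y ≤ N / 2 → N.choose x < N.choose y := by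
  intro y
  induction y with
  | zero => intro x hx _; omega
  | succ y ih =>
    intro x hx hy
    rcases Nat.lt_or_ge x y with h | h
    · exact lt_trans (ih x h (by omega)) (pv_choose_lt N y (by omega))
    · have : x = y := by omega
      subst this
      exact pv_choose_lt N x (by omega)

-- if no value in [1, N/2] equals m (and m ≠ 1), no value in [1, N] does
theorem pv_no_match_all (m : Int) (N : ℕ) (hm : m ≠ 1)
    (hno : ∀ y : ℕ, 1 ≤ y → y ≤ N / 2 → ((N.choose y : ℤ)) ≠ m) :
    ∀ x : ℕ, 1 ≤ x → x ≤ N → ((N.choose x : ℤ)) ≠ m := by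
  intro x hx1 hxN
  rcases Nat.lt_or_ge (N / 2) x with h | h
  · have hsym : N.choose (N - x) = N.choose x := Nat.choose_symm hxN
    rcases Nat.eq_zero_or_pos (N - x) with h0 | hpos
    · have : N.choose x = 1 := by rw [← hsym, h0, Nat.choose_zero_right]
      rw [this]; intro h1; exact hm (by exact_mod_cast h1.symm)
    · have hle : N - x ≤ N / 2 := by omega
      have := hno (N - x) hpos hle
      rw [hsym] at this
      exact this
  · exact hno x hx1 h

theorem pv_loopA_no_match (m n : Int) (l : List Int)
    (h : ∀ x ∈ l, pyComb n x ≠ m) : loopA m n l = -1 := by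
  induction l with
  | nil => rfl
  | cons x xs ih =>
    simp only [loopA]
    rw [if_neg (h x (by simp))]
    exact ih (fun y hy => h y (by simp [hy]))

-- loopA over the tail range returns -1 when nothing in [1, N] matches
theorem pv_loopA_all_no (m n : Int) (hn : 0 ≤ n)
    (hall : ∀ x : ℕ, 1 ≤ x → x ≤ n.toNat → ((n.toNat.choose x : ℤ)) ≠ m)
    (a : Int) (ha : 1 ≤ a) :
    loopA m n (PySem.List.pyRange a (n + 1) 1) = -1 := by
  apply pv_loopA_no_match
  intro x hx
  rw [PySem.List.mem_pyRange_one] at hx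
  have hx1 : 1 ≤ x := le_trans ha hx.1
  have hxn : x ≤ n := by omega
  have := hall x.toNat (by omega) (by omega)
  simpa [pyComb] using this

-- main loop correspondence
theorem pv_main (m n : Int) (hm : m ≠ 1) (hn : 1 ≤ n) :
    ∀ (fuel k : ℕ), fuel = n.toNat / 2 - k → k ≤ n.toNat / 2 →
    (∀ y : ℕ, 1 ≤ y → y ≤ k → ((n.toNat.choose y : ℤ)) ≠ m) →
    loopA m n (PySem.List.pyRange ((k : ℤ) + 1) (n + 1) 1)
      = loopB m n ((n.toNat.choose k : ℤ)) (k : ℤ) fuel := by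
  have hN : ((n.toNat : ℤ)) = n := Int.toNat_of_nonneg (by omega)
  intro fuel
  induction fuel with
  | zero =>
    intro k hf hk hprev
    have hkeq : k = n.toNat / 2 := by omega
    subst hkeq
    simp only [loopB]
    exact pv_loopA_all_no m n (by omega) (pv_no_match_all m n.toNat hm hprev) _ (by omega)
  | succ f ih =>
    intro k hf hk hprev
    have hklt : k + 1 ≤ n.toNat / 2 := by omega
    have hkN : k + 1 ≤ n.toNat := by omega
    -- the incremental value equals C(N, k+1)
    have hc' : PySem.Int.floordiv ((n.toNat.choose k : ℤ) * (n - ((k : ℤ) + 1) + 1)) ((k : ℤ) + 1)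
        = ((n.toNat.choose (k + 1) : ℤ)) := by
      have h1 : n - ((k : ℤ) + 1) + 1 = ((n.toNat - k : ℕ) : ℤ) := by
        push_cast [Nat.cast_sub (by omega : k ≤ n.toNat)]
        omega
      rw [h1, ← Nat.cast_mul]
      have h2 : ((k : ℤ) + 1) = ((k + 1 : ℕ) : ℤ) := by push_cast; ring
      rw [h2, PySem.Int.floordiv_natCast, pv_choose_step]
    -- unfold one step of the range
    rw [PySem.List.pyRange_one_cons (by omega : (k : ℤ) + 1 < n + 1)]
    simp only [loopA, loopB, hc']
    have hcomb : pyComb n ((k : ℤ) + 1) = ((n.toNat.choose (k + 1) : ℤ)) := by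
      have : ((k : ℤ) + 1).toNat = k + 1 := by omega
      simp [pyComb, this]
    rw [hcomb]
    by_cases heq : ((n.toNat.choose (k + 1) : ℤ)) = m
    · rw [if_pos heq, if_pos (le_of_eq heq.symm), if_pos heq]
    · rw [if_neg heq]
      by_cases hge : m ≤ ((n.toNat.choose (k + 1) : ℤ))
      · rw [if_pos hge, if_neg heq]
        -- A also finds nothing further: everything past k+1 is ≠ m
        have hgt : m < ((n.toNat.choose (k + 1) : ℤ)) := lt_of_le_of_ne hge (fun h => heq h.symm)
        have hno : ∀ y : ℕ, 1 ≤ y → y ≤ n.toNat / 2 → ((n.toNat.choose y : ℤ)) ≠ m := by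
          intro y hy1 hy2
          rcases Nat.lt_or_ge y (k + 1) with h | h
          · exact hprev y hy1 (by omega)
          · rcases Nat.eq_or_lt_of_le h with h' | h'
            · rw [← h']; exact heq
            · have := pv_choose_mono n.toNat y (k + 1) h' hy2
              have : ((n.toNat.choose (k + 1) : ℤ)) < ((n.toNat.choose y : ℤ)) := by exact_mod_cast this
              omega
        have h2 : ((k : ℤ) + 1) + 1 = ((k + 1 : ℕ) : ℤ) + 1 := by push_cast; ring
        rw [h2]
        exact pv_loopA_all_no m n (by omega) (pv_no_match_all m n.toNat hm hno) _ (by omega)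
      · rw [if_neg hge]
        have hprev' : ∀ y : ℕ, 1 ≤ y → y ≤ k + 1 → ((n.toNat.choose y : ℤ)) ≠ m := by
          intro y hy1 hy2
          rcases Nat.eq_or_lt_of_le hy2 with h' | h'
          · rw [h']; exact heq
          · exact hprev y hy1 (by omega)
        have h2 : ((k : ℤ) + 1) + 1 = ((k + 1 : ℕ) : ℤ) + 1 := by push_cast; ring
        have h3 : ((k : ℤ) + 1) = ((k + 1 : ℕ) : ℤ) := by push_cast; ring
        rw [h2, h3]
        exact ih (k + 1) (by omega) hklt hprev'

-- ===== VERDICT (by name: the statement is the Claim_ definition above) =====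
theorem checkchoose_spec : Claim_equal_checkchoose := by
  intro m n _
  unfold Spec_checkchoose checkchoose checkchoose_alt
  by_cases hm : m = 1
  · rw [if_pos hm, if_pos hm]
  · rw [if_neg hm, if_neg hm]
    rcases Int.lt_or_le n 1 with hn | hn
    · -- n ≤ 0: both loops are empty
      have hfd : PySem.Int.floordiv n 2 < 1 := by
        rw [PySem.Int.floordiv_lt_iff_lt_mul (by omega)]; omega
      have hfuel : (PySem.Int.floordiv n 2).toNat = 0 := by omega
      rw [hfuel, PySem.List.pyRange_one_eq_nil (by omega)]
      rfl
    · have hfuel : (PySem.Int.floordiv n 2).toNat = n.toNat / 2 := by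
        rw [PySem.Int.floordiv_eq_ediv_of_pos (by omega)]; omega
      rw [hfuel]
      have := pv_main m n hm hn (n.toNat / 2) 0 (by omega) (by omega)
        (by intro y hy1 hy2; omega)
      simpa using this
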